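-- pv_equiv track=rewrite | github.com/ShenXiexs/ETF-Monitoring-Agent | src/agent_manager.py | _match_header
-- ===== SOURCE A (Python) =====
-- from typing import Dict, Iterable, List, Optional
--
-- def _match_header(header_lookup: Dict[str, int], aliases: List[str]) -> Optional[int]:
--     for alias in aliases:
--         if alias in header_lookup:
--             return header_lookup[alias]
--     lowered_lookup = {key.lower(): value for key, value in header_lookup.items()}
--     for alias in aliases:
--         if alias.lower() in lowered_lookup:
--             return lowered_lookup[alias.lower()]
--     return None
-- ===== SOURCE B (Python) =====
-- def _match_header(header_lookup, aliases):
--     lowered_lookup = {key.lower(): value for key, value in header_lookup.items()}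
--     fallback = None
--     have_fallback = False
--     for alias in aliases:
--         if alias in header_lookup:
--             return header_lookup[alias]
--         if not have_fallback:
--             low = alias.lower()
--             if low in lowered_lookup:
--                 fallback = lowered_lookup[low]
--                 have_fallback = True
--     return fallback
-- ===== Notes on version B (the rewrite author's own statement) =====
-- stated objective: simpler
-- what changed: Replaces A's two sequential scans over aliases by a single pass that returns an exact match on sight and defers the first lowercase hit as a fallback returned after the loop.
import Mathlib
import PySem

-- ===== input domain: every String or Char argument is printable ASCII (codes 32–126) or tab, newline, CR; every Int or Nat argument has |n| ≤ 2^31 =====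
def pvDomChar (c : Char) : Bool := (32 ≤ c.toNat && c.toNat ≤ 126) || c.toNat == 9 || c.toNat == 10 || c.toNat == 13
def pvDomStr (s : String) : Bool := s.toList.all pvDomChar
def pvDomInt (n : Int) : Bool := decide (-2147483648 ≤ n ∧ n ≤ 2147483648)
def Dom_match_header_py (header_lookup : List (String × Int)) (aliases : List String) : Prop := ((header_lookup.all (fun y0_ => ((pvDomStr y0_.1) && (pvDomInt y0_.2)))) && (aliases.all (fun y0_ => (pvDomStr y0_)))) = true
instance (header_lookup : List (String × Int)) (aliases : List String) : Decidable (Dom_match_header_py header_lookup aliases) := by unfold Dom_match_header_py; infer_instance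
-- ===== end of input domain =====

-- B replaces A's two sequential scans over the aliases by one pass that returns an exact match
-- on sight and defers the first lowercase hit as a fallback (simpler: one loop instead of two).


-- ===== PORT A =====
-- dict lookup: first match in insertion order (Python dict keys are unique)
def pvLookup : List (String × Int) → String → Option Int
  | [], _ => none
  | (k, v) :: rest, x => if k == x then some v else pvLookup rest x

-- {key.lower(): value for key, value in header_lookup.items()}  (last key wins, via overwrite)
def pvLowered (header_lookup : List (String × Int)) : PySem.Dict String Int :=
  header_lookup.foldl (fun d kv => d.insert (PySem.Str.lower kv.1) kv.2) PySem.Dict.empty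

-- first for-loop of A: exact alias lookup with early return
def pvLoopExact (header_lookup : List (String × Int)) : List String → Option Int
  | [] => none
  | a :: rest =>
    match pvLookup header_lookup a with
    | some v => some v
    | none => pvLoopExact header_lookup rest

-- second for-loop of A: lowered alias lookup with early return
def pvLoopLower (lowered : PySem.Dict String Int) : List String → Option Int
  | [] => none
  | a :: rest =>
    match lowered.get? (PySem.Str.lower a) with
    | some v => some v
    | none => pvLoopLower lowered rest

def match_header_py (header_lookup : List (String × Int)) (aliases : List String) : Option Int :=
  match pvLoopExact header_lookup aliases with
  | some v => some v
  | none => pvLoopLower (pvLowered header_lookup) aliases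

-- ===== PORT B =====
-- B's single loop: exact hit returns immediately; first lowercase hit is kept as a fallback
def pvAltLoop (header_lookup : List (String × Int)) (lowered : PySem.Dict String Int) :
    List String → Option Int → Option Int
  | [], fallback => fallback
  | a :: rest, fallback =>
    match pvLookup header_lookup a with
    | some v => some v
    | none =>
      pvAltLoop header_lookup lowered rest
        (match fallback with
         | some _ => fallback
         | none => lowered.get? (PySem.Str.lower a))

def match_header_py_alt (header_lookup : List (String × Int)) (aliases : List String) : Option Int :=
  pvAltLoop header_lookup (pvLowered header_lookup) aliases none

-- ===== PRECONDITION & SPEC =====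
def Spec_match_header_py (header_lookup : List (String × Int)) (aliases : List String) (out : Option Int) : Prop := out = match_header_py_alt header_lookup aliases
instance (header_lookup : List (String × Int)) (aliases : List String) (out : Option Int) : Decidable (Spec_match_header_py header_lookup aliases out) := by unfold Spec_match_header_py; infer_instance

-- ===== CLAIM (what is proved, stated in full; the proofs are below) =====
def Claim_equal_match_header_py : Prop := ∀ (header_lookup : List (String × Int)) (aliases : List String), Dom_match_header_py header_lookup aliases → Spec_match_header_py header_lookup aliases (match_header_py header_lookup aliases)

-- ===== LEMMAS AND PROOFS =====
theorem pvAltLoop_eq (hl : List (String × Int)) (low : PySem.Dict String Int) :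
    ∀ (aliases : List String) (fb : Option Int),
      pvAltLoop hl low aliases fb =
        match pvLoopExact hl aliases with
        | some v => some v
        | none =>
          match fb with
          | some _ => fb
          | none => pvLoopLower low aliases := by
  intro aliases
  induction aliases with
  | nil => intro fb; cases fb <;> simp [pvAltLoop, pvLoopExact, pvLoopLower]
  | cons a rest ih =>
    intro fb
    simp only [pvAltLoop, pvLoopExact, pvLoopLower]
    cases h : pvLookup hl a with
    | some v => rfl
    | none =>
      cases fb with
      | some w => simp [ih]
      | none =>
        cases g : low.get? (PySem.Str.lower a) with
        | some v => simp [ih]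
        | none => simp [ih]

-- ===== VERDICT (by name: the statement is the Claim_ definition above) =====
theorem match_header_py_spec : Claim_equal_match_header_py := by
  intro hl aliases _
  unfold Spec_match_header_py match_header_py match_header_py_alt
  rw [pvAltLoop_eq]
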